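-- pv_equiv track=rewrite | github.com/lizy202/Semana-6 | Actividad 5/problema1.py | matriz_ajedrez
-- ===== SOURCE A (Python) =====
-- def matriz_ajedrez(n, m):
--     matriz = []
--     for i in range(n):
--         fila = []
--         for j in range(m):
--             if (i + j) % 2 == 0:
--                 fila.append(0)
--             else:
--                 fila.append(1)
--         matriz.append(fila)
--     return matriz
-- ===== SOURCE B (Python) =====
-- def matriz_ajedrez(n, m):
--     if n <= 0:
--         return []
--     # Precompute the two template rows, then replicate (copying) per row parity.
--     even_row = [j % 2 for j in range(m)]        # starts 0,1,0,...
--     odd_row = [(j + 1) % 2 for j in range(m)]   # starts 1,0,1,...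
--     matriz = []
--     for i in range(n):
--         matriz.append(list(even_row) if i % 2 == 0 else list(odd_row))
--     return matriz
-- ===== Notes on version B (the rewrite author's own statement) =====
-- stated objective: faster
-- what changed: B precomputes two template rows of length m once and replicates a copy of the matching one per row, instead of A's per-cell (i+j)%2 conditional in a nested loop.
import Mathlib
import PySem

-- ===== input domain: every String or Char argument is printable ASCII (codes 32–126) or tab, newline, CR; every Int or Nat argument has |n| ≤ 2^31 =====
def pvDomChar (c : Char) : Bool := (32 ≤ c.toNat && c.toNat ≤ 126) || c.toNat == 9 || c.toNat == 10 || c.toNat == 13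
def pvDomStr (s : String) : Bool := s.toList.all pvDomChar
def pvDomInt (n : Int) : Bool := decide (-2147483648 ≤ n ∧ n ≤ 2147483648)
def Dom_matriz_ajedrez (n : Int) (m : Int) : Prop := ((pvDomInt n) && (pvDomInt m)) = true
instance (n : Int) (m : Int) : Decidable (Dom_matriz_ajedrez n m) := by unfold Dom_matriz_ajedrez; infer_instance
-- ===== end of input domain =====

-- B builds the two template rows once and replicates a copy per row parity; objective: faster (constant-factor: per-row pick instead of per-cell mod+branch).

-- ===== PORT A =====
def matriz_ajedrez (n : Int) (m : Int) : List (List Int) :=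
  (PySem.List.pyRange 0 n 1).foldl
    (fun matriz i =>
      matriz ++ [(PySem.List.pyRange 0 m 1).foldl
        (fun fila j => fila ++ [if PySem.Int.mod (i + j) 2 == 0 then (0 : Int) else 1]) []])
    []

-- ===== PORT B =====
def matriz_ajedrez_alt (n : Int) (m : Int) : List (List Int) :=
  if n ≤ 0 then [] else
  let even_row := (PySem.List.pyRange 0 m 1).map (fun j => PySem.Int.mod j 2)
  let odd_row := (PySem.List.pyRange 0 m 1).map (fun j => PySem.Int.mod (j + 1) 2)
  (PySem.List.pyRange 0 n 1).foldl
    (fun matriz i => matriz ++ [if PySem.Int.mod i 2 == 0 then even_row else odd_row]) []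

-- ===== PRECONDITION & SPEC =====
def Spec_matriz_ajedrez (n : Int) (m : Int) (out : List (List Int)) : Prop := out = matriz_ajedrez_alt n m
instance (n : Int) (m : Int) (out : List (List Int)) : Decidable (Spec_matriz_ajedrez n m out) := by unfold Spec_matriz_ajedrez; infer_instance

-- ===== CLAIM (what is proved, stated in full; the proofs are below) =====
def Claim_equal_matriz_ajedrez : Prop := ∀ (n : Int) (m : Int), Dom_matriz_ajedrez n m → Spec_matriz_ajedrez n m (matriz_ajedrez n m)

-- ===== LEMMAS AND PROOFS =====

-- a foldl that only appends is a map
theorem foldl_append_map {α β : Type} (g : α → β) (l : List α) (init : List β) :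
    l.foldl (fun acc x => acc ++ [g x]) init = init ++ l.map g := by
  induction l generalizing init with
  | nil => simp
  | cons x xs ih => simp [List.foldl, ih]

-- each row of A is the corresponding template row of B
theorem row_eq (i m : Int) :
    (PySem.List.pyRange 0 m 1).foldl
      (fun fila j => fila ++ [if PySem.Int.mod (i + j) 2 == 0 then (0 : Int) else 1]) []
    = (if PySem.Int.mod i 2 == 0
        then (PySem.List.pyRange 0 m 1).map (fun j => PySem.Int.mod j 2)
        else (PySem.List.pyRange 0 m 1).map (fun j => PySem.Int.mod (j + 1) 2)) := by
  rw [foldl_append_map]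
  have hmod : ∀ a : Int, PySem.Int.mod a 2 = a % 2 := fun a =>
    PySem.Int.mod_eq_emod_of_pos (by norm_num)
  split_ifs with h
  · simp only [List.nil_append]
    apply List.map_congr_left
    intro j _
    simp only [hmod, beq_iff_eq] at *
    omega
  · simp only [List.nil_append]
    apply List.map_congr_left
    intro j _
    simp only [hmod, beq_iff_eq] at *
    omega

-- ===== VERDICT (by name: the statement is the Claim_ definition above) =====
theorem matriz_ajedrez_spec : Claim_equal_matriz_ajedrez := by
  intro n m _
  unfold Spec_matriz_ajedrez matriz_ajedrez matriz_ajedrez_alt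
  by_cases hn : n ≤ 0
  · simp [hn, PySem.List.pyRange_one_eq_nil hn]
  · simp only [hn, if_false, row_eq]
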